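-- pv_equiv track=rewrite | github.com/gurujeetkhalsa/aga | clubexpress-mail-app/function_app.py | _resolve_article_title_indices
-- ===== SOURCE A (Python) =====
-- from typing import Iterable, Optional
--
-- def _resolve_article_title_indices(news_lines: list[str], ordered_titles: list[str]) -> list[int]:
--     if not ordered_titles:
--         return []
--
--     sequences: list[list[int]] = []
--     search_start = 0
--     while True:
--         sequence: list[int] = []
--         position = search_start
--         for title in ordered_titles:
--             idx = _find_line_index(news_lines, title, position)
--             if idx is None:
--                 sequence = []
--                 break
--             sequence.append(idx)
--             position = idx + 1
--         if not sequence: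
--             break
--         sequences.append(sequence)
--         search_start = sequence[0] + 1
--
--     if not sequences:
--         return []
--     return sequences[-1]
--
-- def _find_line_index(lines: list[str], target: str, start: int) -> Optional[int]:
--     for idx in range(start, len(lines)):
--         if lines[idx] == target:
--             return idx
--     return None
-- ===== SOURCE B (Python) =====
-- def _resolve_article_title_indices(news_lines: list[str], ordered_titles: list[str]) -> list[int]:
--     if not ordered_titles:
--         return []
--     # Index each needed title once: ascending list of line numbers where it occurs.
--     index = {}
--     for t in ordered_titles:
--         if t not in index:
--             index[t] = [i for i, line in enumerate(news_lines) if line == t]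
--
--     def next_at_or_after(occ, pos):
--         # first element of the sorted occurrence list that is >= pos (binary search)
--         lo, hi = 0, len(occ)
--         while lo < hi:
--             mid = (lo + hi) // 2
--             if occ[mid] < pos:
--                 lo = mid + 1
--             else:
--                 hi = mid
--         return occ[lo] if lo < len(occ) else None
--
--     def greedy_from(pos):
--         seq = []
--         for t in ordered_titles:
--             nxt = next_at_or_after(index[t], pos)
--             if nxt is None:
--                 return None
--             seq.append(nxt)
--             pos = nxt + 1
--         return seq
--
--     best = []
--     for s in index[ordered_titles[0]]:
--         seq = greedy_from(s)
--         if seq is None: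
--             break
--         best = seq
--     return best
-- ===== Notes on version B (the rewrite author's own statement) =====
-- stated objective: alternative
-- what changed: B builds a per-title occurrence index of news_lines once and runs the greedy passes directly over the first title's occurrence list, finding each next occurrence by binary search on the occurrence lists instead of rescanning news_lines from the current position inside every pass.
import Mathlib
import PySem

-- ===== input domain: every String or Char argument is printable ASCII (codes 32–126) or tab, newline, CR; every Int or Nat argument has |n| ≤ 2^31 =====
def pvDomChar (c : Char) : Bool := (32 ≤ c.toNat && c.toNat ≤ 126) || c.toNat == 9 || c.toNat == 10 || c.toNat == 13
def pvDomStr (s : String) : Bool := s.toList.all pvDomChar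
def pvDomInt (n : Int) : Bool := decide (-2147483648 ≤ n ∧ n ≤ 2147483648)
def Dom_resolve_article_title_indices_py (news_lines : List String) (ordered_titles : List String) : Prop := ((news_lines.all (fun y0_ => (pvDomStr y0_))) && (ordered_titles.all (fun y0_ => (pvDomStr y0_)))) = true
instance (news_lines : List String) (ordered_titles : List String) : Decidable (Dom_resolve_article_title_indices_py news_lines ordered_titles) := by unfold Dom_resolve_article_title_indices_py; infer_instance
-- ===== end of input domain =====

-- B replaces A's repeated linear rescans of news_lines with a per-title occurrence index
-- built once, and iterates the greedy passes directly over the first title's occurrences.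

-- ===== PORT A =====
-- for idx in range(start, len(lines)): if lines[idx] == target: return idx; return None
def find_line_index (lines : List String) (target : String) (start : Int) : Option Int :=
  (PySem.List.pyRange start (lines.length : Int) 1).find?
    (fun idx => PySem.List.pyGet? lines idx == some target)

-- the inner 'for title in ordered_titles' loop: on failure sequence := [] and break
def a_inner (lines : List String) (titles : List String) (position : Int) (sequence : List Int) : List Int :=
  match titles with
  | [] => sequence
  | t :: rest =>
    match find_line_index lines t position with
    | none => []
    | some idx => a_inner lines rest (idx + 1) (sequence ++ [idx])

-- needed by a_loop's termination: a successful pass starts at or after `position`, before the end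
theorem find_line_index_some_bounds {lines : List String} {target : String} {start i : Int}
    (h : find_line_index lines target start = some i) : start ≤ i ∧ i < (lines.length : Int) := by
  have hmem := List.mem_of_find?_eq_some h
  exact (PySem.List.mem_pyRange_one).1 hmem

theorem a_inner_acc (lines : List String) :
    ∀ (ts : List String) (pos : Int) (acc : List Int),
      a_inner lines ts pos acc = [] ∨ ∃ suf, a_inner lines ts pos acc = acc ++ suf := by
  intro ts
  induction ts with
  | nil => intro pos acc; exact Or.inr ⟨[], by simp [a_inner]⟩
  | cons t rest ih =>
    intro pos acc
    simp only [a_inner]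
    cases hf : find_line_index lines t pos with
    | none => exact Or.inl rfl
    | some idx =>
      rcases ih (idx + 1) (acc ++ [idx]) with h | ⟨suf, hsuf⟩
      · exact Or.inl h
      · exact Or.inr ⟨[idx] ++ suf, by simpa using hsuf⟩

theorem a_inner_head_bounds {lines : List String} {titles : List String} {pos h : Int} {tl : List Int}
    (hseq : a_inner lines titles pos [] = h :: tl) : pos ≤ h ∧ h < (lines.length : Int) := by
  cases titles with
  | nil => simp [a_inner] at hseq
  | cons t rest =>
    rw [a_inner] at hseq
    cases hf : find_line_index lines t pos with
    | none => rw [hf] at hseq; simp at hseq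
    | some idx =>
      rw [hf] at hseq; simp only [] at hseq
      rcases a_inner_acc lines rest (idx + 1) ([] ++ [idx]) with hnil | ⟨suf, hsuf⟩
      · simp only [hnil] at hseq; exact absurd hseq (by simp)
      · simp only [hsuf] at hseq
        simp at hseq
        obtain ⟨hh, -⟩ := hseq
        have := find_line_index_some_bounds hf
        omega

-- the outer 'while True' loop of A (terminates because search_start strictly increases, bounded by len)
def a_loop (lines : List String) (titles : List String) (search_start : Int) (sequences : List (List Int)) : List (List Int) :=
  match hseq : a_inner lines titles search_start [] with
  | [] => sequences
  | h :: tl => a_loop lines titles (h + 1) (sequences ++ [h :: tl])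
termination_by ((lines.length : Int) - search_start).toNat
decreasing_by
  have := a_inner_head_bounds hseq
  omega

def resolve_article_title_indices_py (news_lines : List String) (ordered_titles : List String) : List Int :=
  if ordered_titles.isEmpty then []
  else
    match (a_loop news_lines ordered_titles 0 []).getLast? with
    | none => []
    | some s => s

-- ===== PORT B =====
-- [i for i, line in enumerate(news_lines) if line == t]
def b_occs (lines : List String) (t : String) : List Int :=
  ((PySem.List.enumerate lines 0).filter (fun p => p.2 == t)).map (fun p => p.1)

-- index = {}; for t in ordered_titles: if t not in index: index[t] = [...]
def b_index (lines : List String) (titles : List String) : PySem.Dict String (List Int) :=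
  titles.foldl (fun d t => if d.contains t then d else d.insert t (b_occs lines t)) PySem.Dict.empty

-- while lo < hi: mid = (lo+hi)//2; if occ[mid] < pos: lo = mid+1 else hi = mid
def next_at_or_after_loop (occ : List Int) (pos : Int) (lo hi : Int) : Int :=
  if lo < hi then
    let mid := PySem.Int.floordiv (lo + hi) 2
    if PySem.List.pyGetD occ mid 0 < pos then next_at_or_after_loop occ pos (mid + 1) hi
    else next_at_or_after_loop occ pos lo mid
  else lo
termination_by (hi - lo).toNat
decreasing_by
  · have h1 := (PySem.Int.floordiv_lt_iff_lt_mul (a := lo + hi) (b := 2) (q := hi) (by omega)).2 (by omega)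
    have h2 := (PySem.Int.le_floordiv_iff_mul_le (a := lo + hi) (b := 2) (q := lo) (by omega)).2 (by omega)
    omega
  · have h1 := (PySem.Int.floordiv_lt_iff_lt_mul (a := lo + hi) (b := 2) (q := hi) (by omega)).2 (by omega)
    have h2 := (PySem.Int.le_floordiv_iff_mul_le (a := lo + hi) (b := 2) (q := lo) (by omega)).2 (by omega)
    omega

-- return occ[lo] if lo < len(occ) else None   (lo is in range under the guard, so the getD default is never used — exact)
def next_at_or_after (occ : List Int) (pos : Int) : Option Int :=
  let lo := next_at_or_after_loop occ pos 0 (occ.length : Int)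
  if lo < (occ.length : Int) then some (PySem.List.pyGetD occ lo 0) else none

-- greedy_from: index[t] can not miss (every t was inserted), so getD [] is exact here
def b_greedy (index : PySem.Dict String (List Int)) (titles : List String) (pos : Int) (seq : List Int) : Option (List Int) :=
  match titles with
  | [] => some seq
  | t :: rest =>
    match next_at_or_after (index.getD t []) pos with
    | none => none
    | some nxt => b_greedy index rest (nxt + 1) (seq ++ [nxt])

-- for s in index[ordered_titles[0]]: seq = greedy_from(s); if None: break; best = seq
def b_outer (index : PySem.Dict String (List Int)) (titles : List String) (occ0 : List Int) (best : List Int) : List Int :=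
  match occ0 with
  | [] => best
  | s :: rest =>
    match b_greedy index titles s [] with
    | none => best
    | some seq => b_outer index titles rest seq

def resolve_article_title_indices_py_alt (news_lines : List String) (ordered_titles : List String) : List Int :=
  match ordered_titles with
  | [] => []
  | t0 :: _ =>
    let index := b_index news_lines ordered_titles
    b_outer index ordered_titles (index.getD t0 []) []

-- ===== PRECONDITION & SPEC =====
def Spec_resolve_article_title_indices_py (news_lines : List String) (ordered_titles : List String) (out : List Int) : Prop := out = resolve_article_title_indices_py_alt news_lines ordered_titles
instance (news_lines : List String) (ordered_titles : List String) (out : List Int) : Decidable (Spec_resolve_article_title_indices_py news_lines ordered_titles out) := by unfold Spec_resolve_article_title_indices_py; infer_instance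

-- ===== CLAIM (what is proved, stated in full; the proofs are below) =====
def Claim_equal_resolve_article_title_indices_py : Prop := ∀ (news_lines : List String) (ordered_titles : List String), Dom_resolve_article_title_indices_py news_lines ordered_titles → Spec_resolve_article_title_indices_py news_lines ordered_titles (resolve_article_title_indices_py news_lines ordered_titles)

-- ===== LEMMAS AND PROOFS =====

-- membership / order of the occurrence list
theorem mem_b_occs {lines : List String} {t : String} {i : Int} :
    i ∈ b_occs lines t ↔ ∃ (k : Nat) (h : k < lines.length), i = (k : Int) ∧ lines[k] = t := by
  simp only [b_occs, List.mem_map, List.mem_filter, PySem.List.mem_enumerate_iff]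
  constructor
  · rintro ⟨⟨a, b⟩, ⟨⟨k, hk, hp⟩, hb⟩, rfl⟩
    cases hp
    simp_all
  · rintro ⟨k, hk, rfl, ht⟩
    exact ⟨((k : Int), lines[k]), ⟨⟨k, hk, by simp⟩, by simp [ht]⟩, rfl⟩

theorem b_occs_sorted (lines : List String) (t : String) : (b_occs lines t).Pairwise (· < ·) := by
  have h1 := PySem.List.pairwise_lt_enumerate lines (0 : Int)
  have h2 := h1.sublist (List.filter_sublist (l := PySem.List.enumerate lines 0) (p := fun p => p.2 == t))
  exact h2.map _ (by intro a b hab; exact hab)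

theorem b_occs_nonneg {lines : List String} {t : String} {i : Int} (h : i ∈ b_occs lines t) : 0 ≤ i := by
  rcases mem_b_occs.1 h with ⟨k, hk, rfl, -⟩
  positivity

theorem find?_ge_self {l : List Int} {x : Int} (hs : l.Pairwise (· < ·)) (hm : x ∈ l) :
    l.find? (fun i => decide (x ≤ i)) = some x := by
  induction l with
  | nil => cases hm
  | cons a l ih =>
    rcases List.mem_cons.1 hm with rfl | hm'
    · simp [List.find?]
    · have ha : a < x := (List.pairwise_cons.1 hs).1 x hm'
      rw [List.find?_cons_of_neg (by simp; omega)]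
      exact ih hs.tail hm'

-- CORE: scanning the occurrence index for the next occurrence >= start = A's linear scan of the lines
-- find? by position: a true hit after a false prefix
theorem find?_eq_some_of_prefix {l : List Int} {p : Int → Bool} :
    ∀ (r : Nat) (hr : r < l.length),
      (∀ i (h : i < l.length), i < r → p l[i] = false) → p l[r] = true →
      l.find? p = some l[r] := by
  induction l with
  | nil => intro r hr; exact absurd hr (by simp)
  | cons a t ih =>
    intro r hr hbefore hp
    cases r with
    | zero =>
      simp only [List.getElem_cons_zero] at hp ⊢
      rw [List.find?_cons_of_pos hp]
    | succ r' =>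
      rw [List.find?_cons_of_neg (by simpa using hbefore 0 (by omega) (by omega))]
      simp only [List.getElem_cons_succ] at hp ⊢
      exact ih r' (by simpa using hr)
        (fun i h hlt => by simpa using hbefore (i + 1) (by simpa using h) (by omega)) hp

-- the recursion equation of the search loop, with the local 'mid' inlined
theorem next_at_or_after_loop_eq (occ : List Int) (pos lo hi : Int) :
    next_at_or_after_loop occ pos lo hi =
      if lo < hi then
        if PySem.List.pyGetD occ (PySem.Int.floordiv (lo + hi) 2) 0 < pos then
          next_at_or_after_loop occ pos (PySem.Int.floordiv (lo + hi) 2 + 1) hi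
        else next_at_or_after_loop occ pos lo (PySem.Int.floordiv (lo + hi) 2)
      else lo := by
  rw [next_at_or_after_loop]

-- the binary search maintains: everything left of lo is < pos, everything from hi on is ≥ pos
theorem next_at_or_after_loop_spec {occ : List Int} (hs : occ.Pairwise (· ≤ ·)) (pos : Int) :
    ∀ (lo hi : Int), 0 ≤ lo → lo ≤ hi → hi ≤ (occ.length : Int) →
      (∀ i : Nat, (h : i < occ.length) → (i : Int) < lo → occ[i] < pos) →
      (∀ i : Nat, (h : i < occ.length) → hi ≤ (i : Int) → pos ≤ occ[i]) →
      lo ≤ next_at_or_after_loop occ pos lo hi ∧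
      next_at_or_after_loop occ pos lo hi ≤ hi ∧
      (∀ i : Nat, (h : i < occ.length) → (i : Int) < next_at_or_after_loop occ pos lo hi → occ[i] < pos) ∧
      (∀ i : Nat, (h : i < occ.length) → next_at_or_after_loop occ pos lo hi ≤ (i : Int) → pos ≤ occ[i]) := by
  have hmono := List.pairwise_iff_getElem.1 hs
  have H : ∀ (fuel : Nat) (lo hi : Int), (hi - lo).toNat ≤ fuel →
      0 ≤ lo → lo ≤ hi → hi ≤ (occ.length : Int) →
      (∀ i : Nat, (h : i < occ.length) → (i : Int) < lo → occ[i] < pos) →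
      (∀ i : Nat, (h : i < occ.length) → hi ≤ (i : Int) → pos ≤ occ[i]) →
      lo ≤ next_at_or_after_loop occ pos lo hi ∧
      next_at_or_after_loop occ pos lo hi ≤ hi ∧
      (∀ i : Nat, (h : i < occ.length) → (i : Int) < next_at_or_after_loop occ pos lo hi → occ[i] < pos) ∧
      (∀ i : Nat, (h : i < occ.length) → next_at_or_after_loop occ pos lo hi ≤ (i : Int) → pos ≤ occ[i]) := by
    intro fuel
    induction fuel with
    | zero =>
      intro lo hi hf h0 hlh hhl hleft hright
      have : ¬ lo < hi := by omega
      rw [next_at_or_after_loop_eq, if_neg this]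
      refine ⟨le_refl _, by omega, hleft, fun i h hge => hright i h (by omega)⟩
    | succ n ihf =>
      intro lo hi hf h0 hlh hhl hleft hright
      by_cases hlt : lo < hi
      · rw [next_at_or_after_loop_eq, if_pos hlt]
        have hm1 := (PySem.Int.floordiv_lt_iff_lt_mul (a := lo + hi) (b := 2) (q := hi) (by omega)).2 (by omega)
        have hm2 := (PySem.Int.le_floordiv_iff_mul_le (a := lo + hi) (b := 2) (q := lo) (by omega)).2 (by omega)
        set mid := PySem.Int.floordiv (lo + hi) 2 with hmid
        have hmn : mid.toNat < occ.length := by omega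
        have hgd : PySem.List.pyGetD occ mid 0 = occ[mid.toNat] :=
          PySem.List.pyGetD_eq_getElem occ 0 (by omega) (by omega)
        rw [hgd]
        by_cases hc : occ[mid.toNat] < pos
        · rw [if_pos hc]
          have hleft' : ∀ i : Nat, (h : i < occ.length) → (i : Int) < mid + 1 → occ[i] < pos := by
            intro i h hi2
            rcases lt_or_eq_of_le (show i ≤ mid.toNat by omega) with hlt2 | heq
            · exact lt_of_le_of_lt (hmono i mid.toNat h hmn hlt2) hc
            · subst heq; exact hc
          have := ihf (mid + 1) hi (by omega) (by omega) (by omega) hhl hleft' hright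
          exact ⟨by omega, this.2.1, this.2.2.1, this.2.2.2⟩
        · rw [if_neg hc]
          have hright' : ∀ i : Nat, (h : i < occ.length) → mid ≤ (i : Int) → pos ≤ occ[i] := by
            intro i h hi2
            rcases lt_or_eq_of_le (show mid.toNat ≤ i by omega) with hlt2 | heq
            · exact le_trans (by omega) (hmono mid.toNat i hmn h hlt2)
            · subst heq; omega
          have := ihf lo mid (by omega) (by omega) (by omega) (by omega) hleft hright'
          exact ⟨this.1, by omega, this.2.2.1, this.2.2.2⟩
      · rw [next_at_or_after_loop_eq, if_neg hlt]
        refine ⟨le_refl _, by omega, hleft, fun i h hge => hright i h (by omega)⟩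
  intro lo hi
  exact H (hi - lo).toNat lo hi le_rfl

-- the hand-written binary search computes the same next occurrence as a linear find?
theorem next_at_or_after_eq_find? {occ : List Int} (hs : occ.Pairwise (· < ·)) (pos : Int) :
    next_at_or_after occ pos = occ.find? (fun i => decide (pos ≤ i)) := by
  have hspec := next_at_or_after_loop_spec (hs.imp le_of_lt) pos 0 (occ.length : Int)
    (by omega) (by omega) (by omega) (by omega) (by omega)
  rw [next_at_or_after]
  set r := next_at_or_after_loop occ pos 0 (occ.length : Int) with hr
  obtain ⟨hr0, hrlen, hleft, hright⟩ := hspec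
  by_cases hlt : r < (occ.length : Int)
  · rw [if_pos hlt]
    have hrn : r.toNat < occ.length := by omega
    rw [PySem.List.pyGetD_eq_getElem occ 0 (by omega) hlt]
    rw [find?_eq_some_of_prefix r.toNat hrn
      (fun i h hi2 => by simpa using hleft i h (by omega))
      (by simpa using hright r.toNat hrn (by omega))]
  · rw [if_neg hlt]
    symm
    apply List.find?_eq_none.2
    intro x hx
    obtain ⟨i, h, hxe⟩ := List.getElem_of_mem hx
    simp only [decide_eq_true_eq]
    have := hleft i h (by omega)
    omega

theorem find?_congr_mem {l : List Int} {p q : Int → Bool} (h : ∀ a ∈ l, p a = q a) :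
    l.find? p = l.find? q := by
  induction l with
  | nil => rfl
  | cons a l ih =>
    have ha := h a (List.mem_cons_self ..)
    by_cases hp : p a = true
    · rw [List.find?_cons_of_pos hp, List.find?_cons_of_pos (ha ▸ hp)]
    · rw [List.find?_cons_of_neg hp, List.find?_cons_of_neg (ha ▸ hp)]
      exact ih fun a h' => h a (List.mem_cons_of_mem _ h')

theorem occs_find_eq_find_line_index (lines : List String) (t : String) :
    ∀ (start : Int), 0 ≤ start →
      (b_occs lines t).find? (fun i => decide (start ≤ i)) = find_line_index lines t start := by
  have H : ∀ (fuel : Nat) (start : Int), 0 ≤ start → ((lines.length : Int) - start).toNat ≤ fuel →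
      (b_occs lines t).find? (fun i => decide (start ≤ i)) = find_line_index lines t start := by
    intro fuel
    induction fuel with
    | zero =>
      intro start h0 hf
      have hlen : (lines.length : Int) ≤ start := by omega
      rw [find_line_index, PySem.List.pyRange_one_eq_nil hlen]
      simp only [List.find?_nil]
      apply List.find?_eq_none.2
      intro i hi
      rcases mem_b_occs.1 hi with ⟨k, hk, rfl, -⟩
      simp; omega
    | succ n ih =>
      intro start h0 hf
      by_cases hlen : (lines.length : Int) ≤ start
      · rw [find_line_index, PySem.List.pyRange_one_eq_nil hlen]
        simp only [List.find?_nil]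
        apply List.find?_eq_none.2
        intro i hi
        rcases mem_b_occs.1 hi with ⟨k, hk, rfl, -⟩
        simp; omega
      · have hlt : start < (lines.length : Int) := by omega
        have hkn : start.toNat < lines.length := by omega
        have hg : PySem.List.pyGet? lines start = some lines[start.toNat] :=
          PySem.List.pyGet?_eq_some_getElem lines h0 hlt
        rw [find_line_index, PySem.List.pyRange_one_cons hlt]
        by_cases ht : lines[start.toNat] = t
        · rw [List.find?_cons_of_pos (by simp [hg, ht])]
          exact find?_ge_self (b_occs_sorted lines t)
            (mem_b_occs.2 ⟨start.toNat, hkn, by omega, ht⟩)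
        · rw [List.find?_cons_of_neg (by simp [hg, ht])]
          have hns : (start : Int) ∉ b_occs lines t := by
            intro hmem
            rcases mem_b_occs.1 hmem with ⟨k, hk, hik, hkt⟩
            have : k = start.toNat := by omega
            exact ht (this ▸ hkt)
          have := ih (start + 1) (by omega) (by omega)
          rw [find_line_index] at this
          rw [← this]
          apply find?_congr_mem
          intro a ha
          have : a ≠ start := fun h => hns (h ▸ ha)
          simp only [decide_eq_decide]
          omega
  intro start h0
  exact H ((lines.length : Int) - start).toNat start h0 le_rfl

-- the index dict maps every requested title to its occurrence list
theorem b_index_get?_aux (lines : List String) :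
    ∀ (titles : List String) (d : PySem.Dict String (List Int)),
      (∀ s, d.get? s = none ∨ d.get? s = some (b_occs lines s)) →
      ∀ t, (t ∈ titles ∨ d.get? t = some (b_occs lines t)) →
        (titles.foldl (fun d t => if d.contains t then d else d.insert t (b_occs lines t)) d).get? t
          = some (b_occs lines t) := by
  intro titles
  induction titles with
  | nil =>
    intro d hinv t ht
    rcases ht with h | h
    · cases h
    · simpa using h
  | cons t' rest ih =>
    intro d hinv t ht
    rw [List.foldl_cons]
    set d' := if d.contains t' then d else d.insert t' (b_occs lines t') with hd'
    have hinv' : ∀ s, d'.get? s = none ∨ d'.get? s = some (b_occs lines s) := by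
      intro s
      rw [hd']
      split
      · exact hinv s
      · rw [PySem.Dict.get?_insert]
        split
        · next heq => exact Or.inr (by rw [heq])
        · exact hinv s
    have ht' : d'.get? t' = some (b_occs lines t') := by
      rw [hd']
      split
      · next hc =>
        rcases hinv t' with h | h
        · rw [PySem.Dict.contains_eq_isSome_get?, h] at hc; simp at hc
        · exact h
      · exact PySem.Dict.get?_insert_self ..
    apply ih d' hinv'
    rcases ht with h | h
    · rcases List.mem_cons.1 h with rfl | hr
      · exact Or.inr ht'
      · exact Or.inl hr
    · by_cases he : t = t'
      · exact Or.inr (he ▸ ht')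
      · refine Or.inr ?_
        rw [hd']
        split
        · exact h
        · rw [PySem.Dict.get?_insert, if_neg he]; exact h

theorem b_index_getD {lines : List String} {titles : List String} {t : String} (h : t ∈ titles) :
    (b_index lines titles).getD t [] = b_occs lines t := by
  have := b_index_get?_aux lines titles PySem.Dict.empty (fun s => Or.inl (by simp)) t (Or.inl h)
  rw [b_index, PySem.Dict.getD_eq_get?_getD, this]
  rfl

-- the inner greedy passes agree (A signals failure by [], B by none)
theorem inner_eq (lines : List String) (index : PySem.Dict String (List Int)) :
    ∀ (ts : List String) (pos : Int) (seq : List Int),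
      (∀ t ∈ ts, index.getD t [] = b_occs lines t) → 0 ≤ pos →
      a_inner lines ts pos seq = (b_greedy index ts pos seq).getD [] := by
  intro ts
  induction ts with
  | nil => intro pos seq _ _; simp [a_inner, b_greedy]
  | cons t rest ih =>
    intro pos seq hidx hpos
    rw [a_inner, b_greedy, hidx t (List.mem_cons_self ..),
        next_at_or_after_eq_find? (b_occs_sorted lines t) pos,
        occs_find_eq_find_line_index lines t pos hpos]
    cases hf : find_line_index lines t pos with
    | none => simp
    | some idx =>
      simp only [Option.getD]
      have hb := find_line_index_some_bounds hf
      exact ih (idx + 1) (seq ++ [idx])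
        (fun t' h' => hidx t' (List.mem_cons_of_mem _ h')) (by omega)

-- a successful greedy pass extends its accumulator
theorem b_greedy_acc {index : PySem.Dict String (List Int)} :
    ∀ {ts : List String} {pos : Int} {seq q : List Int},
      b_greedy index ts pos seq = some q → ∃ suf, q = seq ++ suf := by
  intro ts
  induction ts with
  | nil => intro pos seq q h; exact ⟨[], by simpa [b_greedy] using h.symm⟩
  | cons t rest ih =>
    intro pos seq q h
    rw [b_greedy] at h
    cases hf : next_at_or_after (index.getD t []) pos with
    | none => rw [hf] at h; exact absurd h (by simp)
    | some nxt =>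
      rw [hf] at h; simp only [] at h
      rcases ih h with ⟨suf, hsuf⟩
      exact ⟨nxt :: suf, by simpa using hsuf⟩

-- dropping a weaker prefix first does not change dropWhile
theorem dropWhile_dropWhile {l : List Int} {p q : Int → Bool} (h : ∀ x, q x = true → p x = true) :
    (l.dropWhile q).dropWhile p = l.dropWhile p := by
  induction l with
  | nil => rfl
  | cons a l ih =>
    by_cases hq : q a = true
    · rw [List.dropWhile_cons_of_pos hq, ih, List.dropWhile_cons_of_pos (h a hq)]
    · rw [List.dropWhile_cons_of_neg hq]

-- the head surviving dropWhile fails the predicate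
theorem dropWhile_eq_cons_head_false {l : List Int} {p : Int → Bool} {a : Int} {t : List Int}
    (h : l.dropWhile p = a :: t) : p a = false := by
  induction l with
  | nil => exact absurd h (by simp)
  | cons x xs ih =>
    by_cases hx : p x = true
    · rw [List.dropWhile_cons_of_pos hx] at h; exact ih h
    · rw [List.dropWhile_cons_of_neg hx] at h
      cases h; simpa using hx

-- the two thinning predicates coincide
theorem not_le_decide (start : Int) :
    (fun i : Int => !decide (start ≤ i)) = (fun i : Int => decide (i < start)) := by
  funext i; by_cases h : start ≤ i <;> simp [h] <;> omega

-- find the next occurrence as the head of the thinned occurrence list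
theorem find_line_index_eq_head_dropWhile (lines : List String) (t : String) {start : Int}
    (h0 : 0 ≤ start) :
    find_line_index lines t start
      = ((b_occs lines t).dropWhile (fun i => decide (i < start))).head? := by
  rw [← occs_find_eq_find_line_index lines t start h0,
      List.find?_eq_head?_dropWhile_not, not_le_decide]

-- the outer loops agree
theorem outer_eq (lines : List String) (index : PySem.Dict String (List Int))
    (t0 : String) (ts : List String)
    (Hidx : ∀ t ∈ t0 :: ts, index.getD t [] = b_occs lines t) :
    ∀ (occR : List Int) (start : Int) (seqs : List (List Int)),
      0 ≤ start →
      occR = (b_occs lines t0).dropWhile (fun i => decide (i < start)) →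
      ((a_loop lines (t0 :: ts) start seqs).getLast?).getD []
        = b_outer index (t0 :: ts) occR ((seqs.getLast?).getD []) := by
  intro occR
  induction occR generalizing Hidx with
  | nil =>
    intro start seqs h0 hdrop
    have hfind : find_line_index lines t0 start = none := by
      rw [find_line_index_eq_head_dropWhile lines t0 h0, ← hdrop]; rfl
    rw [a_loop]
    have hinner : a_inner lines (t0 :: ts) start [] = [] := by
      rw [a_inner, hfind]
    rw [hinner]  -- ??? match on hseq
    rfl
  | cons s rest ih =>
    intro start seqs h0 hdrop
    have hocc := (b_occs_sorted lines t0)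
    have hsuffix : s :: rest <:+ b_occs lines t0 := hdrop ▸ List.dropWhile_suffix _
    have hpw : (s :: rest).Pairwise (· < ·) := hocc.sublist hsuffix.sublist
    have hs_mem : s ∈ b_occs lines t0 := hsuffix.subset (List.mem_cons_self ..)
    have hs0 : 0 ≤ s := b_occs_nonneg hs_mem
    have hs_ge : start ≤ s := by
      have := dropWhile_eq_cons_head_false hdrop.symm
      simp at this; omega
    have hfind : find_line_index lines t0 start = some s := by
      rw [find_line_index_eq_head_dropWhile lines t0 h0, ← hdrop]; rfl
    have hg0 : next_at_or_after (index.getD t0 []) s = some s := by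
      rw [Hidx t0 (List.mem_cons_self ..), next_at_or_after_eq_find? hocc s]
      exact find?_ge_self hocc hs_mem
    have hinner : a_inner lines (t0 :: ts) start []
        = (b_greedy index ts (s + 1) [s]).getD [] := by
      rw [a_inner, hfind]
      exact inner_eq lines index ts (s + 1) [s]
        (fun t' h' => Hidx t' (List.mem_cons_of_mem _ h')) (by omega)
    have houter : b_outer index (t0 :: ts) (s :: rest) ((seqs.getLast?).getD [])
        = match b_greedy index ts (s + 1) [s] with
          | none => (seqs.getLast?).getD []
          | some seq => b_outer index (t0 :: ts) rest seq := by
      rw [b_outer, b_greedy, hg0]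
      rfl
    cases hg : b_greedy index ts (s + 1) [s] with
    | none =>
      rw [a_loop]
      rw [houter, hg]
      have : a_inner lines (t0 :: ts) start [] = [] := by rw [hinner, hg]; rfl
      rw [this]
    | some q =>
      rcases b_greedy_acc hg with ⟨suf, hsuf⟩
      have hq : q = s :: suf := by simpa using hsuf
      have hdrop' : rest = (b_occs lines t0).dropWhile (fun i => decide (i < s + 1)) := by
        rw [← dropWhile_dropWhile (l := b_occs lines t0)
              (p := fun i => decide (i < s + 1)) (q := fun i => decide (i < start))
              (by intro x hx; simp at hx ⊢; omega),
            ← hdrop, List.dropWhile_cons_of_pos (by simp)]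
        cases rest with
        | nil => rfl
        | cons r rr =>
          have hsr : s < r := (List.pairwise_cons.1 hpw).1 r (List.mem_cons_self ..)
          rw [List.dropWhile_cons_of_neg (by simp; omega)]
      have hinner' : a_inner lines (t0 :: ts) start [] = s :: suf := by
        rw [hinner, hg, hq]; rfl
      rw [a_loop]
      rw [houter, hg]
      rw [hinner']
      have := ih (fun t h => Hidx t h) (s + 1) (seqs ++ [s :: suf]) (by omega) hdrop'
      rw [this, List.getLast?_concat]
      simp [hq]

-- ===== VERDICT (by name: the statement is the Claim_ definition above) =====
theorem resolve_article_title_indices_py_spec : Claim_equal_resolve_article_title_indices_py := by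
  intro news_lines ordered_titles _hdom
  unfold Spec_resolve_article_title_indices_py
  cases ordered_titles with
  | nil => rfl
  | cons t0 ts =>
    rw [resolve_article_title_indices_py, resolve_article_title_indices_py_alt]
    have Hidx : ∀ t ∈ t0 :: ts,
        (b_index news_lines (t0 :: ts)).getD t [] = b_occs news_lines t :=
      fun t h => b_index_getD h
    have hdrop0 : (b_occs news_lines t0)
        = (b_occs news_lines t0).dropWhile (fun i => decide (i < 0)) := by
      cases hocc : b_occs news_lines t0 with
      | nil => rfl
      | cons a l =>
        have ha : 0 ≤ a := b_occs_nonneg (hocc ▸ List.mem_cons_self ..)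
        rw [List.dropWhile_cons_of_neg (by simp; omega)]
    have := outer_eq news_lines (b_index news_lines (t0 :: ts)) t0 ts Hidx
      (b_occs news_lines t0) 0 [] le_rfl hdrop0
    simp only [List.isEmpty_cons, Bool.false_eq_true, if_false]
    rw [Hidx t0 (List.mem_cons_self ..)]
    simp only [List.getLast?_nil, Option.getD_none] at this
    rw [← this]
    cases (a_loop news_lines (t0 :: ts) 0 []).getLast? <;> rfl
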